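-- pv_equiv track=rewrite | github.com/LatentDream/flojoy-studio | PYTHON/WATCH/watch.py | get_loop_body_nodes
-- ===== SOURCE A (Python) =====
-- def get_loop_body_nodes(hash_map, loop_nodes):
--     sorting_order_loopnodes = loop_nodes
--     for key, parents in hash_map.items():
--         if 'LOOP' in key and len(parents) > 0:
--
--             for parent in parents:
--
--                 parent_loop_nodes = loop_nodes[parent].copy()
--                 child_loop_nodes = loop_nodes[key].copy()
--
--                 for node in child_loop_nodes:
--                     parent_loop_nodes.remove(
--                         node) if node in parent_loop_nodes else ''
--
--                 sorting_order_loopnodes[parent] = parent_loop_nodes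
--
--     return sorting_order_loopnodes
-- ===== SOURCE B (Python) =====
-- from collections import Counter
--
-- def _subtract(counts, nodes):
--     kept = []
--     for x in nodes:
--         if counts.get(x, 0) > 0:
--             counts[x] -= 1
--         else:
--             kept.append(x)
--     return kept
--
-- def _apply(key, parents, loop_nodes):
--     for parent in parents:
--         loop_nodes[parent] = _subtract(Counter(loop_nodes[key]), loop_nodes[parent])
--
-- def get_loop_body_nodes(hash_map, loop_nodes):
--     for key, parents in hash_map.items():
--         if 'LOOP' in key and parents:
--             _apply(key, parents, loop_nodes)
--     return loop_nodes
-- ===== Notes on version B (the rewrite author's own statement) =====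
-- stated objective: alternative
-- what changed: The inner multiset subtraction is rebuilt around a Counter of the child list consumed in one forward pass over the parent list (keep a node iff its count is exhausted), replacing A's per-child-node list.remove scan on a mutated copy; the work is also decomposed into named helpers instead of one triply-nested loop.
import Mathlib
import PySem

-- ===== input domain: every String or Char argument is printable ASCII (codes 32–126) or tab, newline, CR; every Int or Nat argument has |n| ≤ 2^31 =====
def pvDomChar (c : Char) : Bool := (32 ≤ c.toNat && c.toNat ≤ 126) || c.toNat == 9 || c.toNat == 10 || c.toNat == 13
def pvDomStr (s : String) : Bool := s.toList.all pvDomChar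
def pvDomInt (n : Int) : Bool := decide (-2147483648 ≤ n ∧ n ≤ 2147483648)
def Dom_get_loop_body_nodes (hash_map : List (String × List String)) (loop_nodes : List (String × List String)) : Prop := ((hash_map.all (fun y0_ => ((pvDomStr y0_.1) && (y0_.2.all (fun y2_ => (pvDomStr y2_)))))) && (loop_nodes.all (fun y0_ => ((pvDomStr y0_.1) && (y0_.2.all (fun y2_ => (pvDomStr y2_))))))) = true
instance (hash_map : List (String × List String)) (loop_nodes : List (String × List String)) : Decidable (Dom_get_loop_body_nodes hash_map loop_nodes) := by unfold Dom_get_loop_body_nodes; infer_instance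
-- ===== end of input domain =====

-- B replaces the per-child-node list.remove scans with a Counter of the child list consumed in
-- one forward pass over the parent list, decomposed into named helper functions. Both versions
-- mutate loop_nodes in place in Python and return the same (aliased) dict; the equivalence
-- proved here is about the returned value.


-- ===== PORT A =====
-- inner 'for node in child_loop_nodes: parent_loop_nodes.remove(node) if node in parent_loop_nodes else '''
def pvRemoveLoop (child : List String) (parentList : List String) : List String :=
  child.foldl (fun st node =>
    if node ∈ st then (PySem.List.remove? st node).getD st else st) parentList

def get_loop_body_nodes (hash_map : List (String × List String)) (loop_nodes : List (String × List String)) : List (String × List String) :=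
  -- hash_map / loop_nodes are Python dicts; .items() iterates the dict's entries
  (((PySem.Dict.ofList hash_map).items).foldl (fun ln kp =>
      if PySem.Str.isIn "LOOP" kp.1 = true ∧ 0 < kp.2.length then
        kp.2.foldl (fun ln2 parent =>
          let parent_loop_nodes := ln2.getD parent []   -- loop_nodes[parent] (Pre_ excludes KeyError)
          let child_loop_nodes := ln2.getD kp.1 []      -- loop_nodes[key]   (Pre_ excludes KeyError)
          ln2.insert parent (pvRemoveLoop child_loop_nodes parent_loop_nodes)) ln
      else ln) (PySem.Dict.ofList loop_nodes)).items

-- ===== PORT B =====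
-- _subtract: one forward pass over the parent list, consuming the Counter of the child list
-- (Python mutates the Counter in place; here it is threaded functionally, which is exact)
def pvSubtract (counts : PySem.Dict String Int) (kept : List String) : List String → List String
  | [] => kept
  | x :: xs =>
    if counts.getD x 0 > 0 then pvSubtract (counts.insert x (counts.getD x 0 - 1)) kept xs
    else pvSubtract counts (kept ++ [x]) xs

-- _apply: rewrite each parent's list (loop_nodes[key] is re-read per parent, as in Python)
def pvApply (key : String) (parents : List String) (ln : PySem.Dict String (List String)) : PySem.Dict String (List String) :=
  match parents with
  | [] => ln
  | p :: ps => pvApply key ps (ln.insert p (pvSubtract (PySem.Dict.counter (ln.getD key [])) [] (ln.getD p [])))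

def pvOuter : List (String × List String) → PySem.Dict String (List String) → PySem.Dict String (List String)
  | [], ln => ln
  | (k, ps) :: rest, ln =>
    pvOuter rest (if PySem.Str.isIn "LOOP" k = true ∧ ps ≠ [] then pvApply k ps ln else ln)

def get_loop_body_nodes_alt (hash_map : List (String × List String)) (loop_nodes : List (String × List String)) : List (String × List String) :=
  (pvOuter ((PySem.Dict.ofList hash_map).items) (PySem.Dict.ofList loop_nodes)).items

-- ===== PRECONDITION & SPEC =====
-- Pre_ excludes exactly the inputs where the Python A raises KeyError: a qualifying
-- hash_map entry ('LOOP' in key, non-empty parents) whose key or one of whose parents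
-- is not a key of loop_nodes (keys of loop_nodes never change during the run).
def Pre_get_loop_body_nodes (hash_map : List (String × List String)) (loop_nodes : List (String × List String)) : Prop :=
  ∀ kp ∈ (PySem.Dict.ofList hash_map).items,
    (PySem.Str.isIn "LOOP" kp.1 = true ∧ 0 < kp.2.length) →
      (PySem.Dict.ofList loop_nodes).contains kp.1 = true ∧
      ∀ p ∈ kp.2, (PySem.Dict.ofList loop_nodes).contains p = true
instance (hash_map : List (String × List String)) (loop_nodes : List (String × List String)) : Decidable (Pre_get_loop_body_nodes hash_map loop_nodes) := by unfold Pre_get_loop_body_nodes; infer_instance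

def pvWitness_get_loop_body_nodes : (List (String × List String)) × (List (String × List String)) :=
  ([("LOOP1", ["p"])], [("p", ["a", "b", "a"]), ("LOOP1", ["a"])])

def Spec_get_loop_body_nodes (hash_map : List (String × List String)) (loop_nodes : List (String × List String)) (out : List (String × List String)) : Prop := out = get_loop_body_nodes_alt hash_map loop_nodes
instance (hash_map : List (String × List String)) (loop_nodes : List (String × List String)) (out : List (String × List String)) : Decidable (Spec_get_loop_body_nodes hash_map loop_nodes out) := by unfold Spec_get_loop_body_nodes; infer_instance

-- ===== CLAIM (what is proved, stated in full; the proofs are below) =====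
def Claim_equal_get_loop_body_nodes : Prop := ∀ (hash_map : List (String × List String)) (loop_nodes : List (String × List String)), Dom_get_loop_body_nodes hash_map loop_nodes → Pre_get_loop_body_nodes hash_map loop_nodes → Spec_get_loop_body_nodes hash_map loop_nodes (get_loop_body_nodes hash_map loop_nodes)

-- ===== LEMMAS AND PROOFS =====

-- abstract version of B's pass: skip the first (m v) occurrences of each value v
def pvSub (m : String → Int) : List String → List String
  | [] => []
  | x :: xs => if m x > 0 then pvSub (fun v => if v = x then m x - 1 else m v) xs
               else x :: pvSub m xs

theorem pvRemoveLoop_eq_diff (child p : List String) :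
    pvRemoveLoop child p = p.diff child := by
  rw [List.diff_eq_foldl, pvRemoveLoop]
  congr 1
  funext st n
  by_cases h : n ∈ st
  · rw [if_pos h, PySem.List.remove?_eq_some_erase _ _ h, Option.getD_some]
  · rw [if_neg h, List.erase_of_not_mem h]

theorem pvSubtract_eq_pvSub (nodes : List String) (d : PySem.Dict String Int) (acc : List String) :
    pvSubtract d acc nodes = acc ++ pvSub (fun v => d.getD v 0) nodes := by
  induction nodes generalizing d acc with
  | nil => simp [pvSubtract, pvSub]
  | cons x xs ih =>
    simp only [pvSubtract]
    by_cases h : d.getD x 0 > 0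
    · rw [if_pos h, ih]
      simp only [pvSub, if_pos h]
      congr 2
      funext v
      rw [PySem.Dict.getD_insert]
    · rw [if_neg h, ih]
      simp only [pvSub, if_neg h]
      simp [List.append_assoc]

theorem pvSub_count_eq_diff (p c : List String) :
    pvSub (fun v => (c.count v : Int)) p = p.diff c := by
  induction p generalizing c with
  | nil => simp [pvSub]
  | cons x xs ih =>
    by_cases h : x ∈ c
    · have hpos : (0 : Int) < (c.count x : Int) := by
        exact_mod_cast List.count_pos_iff.mpr h
      have hf : (fun v => if v = x then (c.count x : Int) - 1 else (c.count v : Int))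
          = (fun v => ((c.erase x).count v : Int)) := by
        funext v
        by_cases hv : v = x
        · subst hv
          have h1 : 1 ≤ c.count v := List.count_pos_iff.mpr h
          rw [if_pos rfl, List.count_erase_self]
          omega
        · rw [if_neg hv, List.count_erase_of_ne hv]
      simp only [pvSub, if_pos hpos, hf, ih, List.cons_diff, if_pos h]
    · have hz : ¬ ((0 : Int) < (c.count x : Int)) := by
        simp [List.count_eq_zero_of_not_mem h]
      simp only [pvSub, if_neg hz, ih, List.cons_diff, if_neg h]

theorem pvInner_eq (c p : List String) :
    pvSubtract (PySem.Dict.counter c) [] p = pvRemoveLoop c p := by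
  rw [pvSubtract_eq_pvSub, List.nil_append]
  have hf : (fun v => (PySem.Dict.counter c).getD v 0) = (fun v => ((c.count v : Nat) : Int)) := by
    funext v; rw [PySem.Dict.getD_counter]
  rw [hf, pvSub_count_eq_diff, pvRemoveLoop_eq_diff]

theorem pvApply_eq (key : String) (ps : List String) (ln : PySem.Dict String (List String)) :
    pvApply key ps ln = ps.foldl (fun ln2 parent =>
      ln2.insert parent (pvRemoveLoop (ln2.getD key []) (ln2.getD parent []))) ln := by
  induction ps generalizing ln with
  | nil => rfl
  | cons p ps ih =>
    simp only [pvApply, List.foldl_cons, ih, pvInner_eq]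

theorem pvOuter_eq (l : List (String × List String)) (ln : PySem.Dict String (List String)) :
    pvOuter l ln = l.foldl (fun ln kp =>
      if PySem.Str.isIn "LOOP" kp.1 = true ∧ 0 < kp.2.length then
        kp.2.foldl (fun ln2 parent =>
          ln2.insert parent (pvRemoveLoop (ln2.getD kp.1 []) (ln2.getD parent []))) ln
      else ln) ln := by
  induction l generalizing ln with
  | nil => rfl
  | cons kp rest ih =>
    obtain ⟨k, ps⟩ := kp
    simp only [pvOuter, List.foldl_cons, ih]
    congr 1
    by_cases h : PySem.Str.isIn "LOOP" k = true ∧ ps ≠ []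
    · rw [if_pos h, if_pos ⟨h.1, List.length_pos_iff.mpr h.2⟩, pvApply_eq]
    · rw [if_neg h, if_neg (fun hc => h ⟨hc.1, List.ne_nil_of_length_pos hc.2⟩)]

-- ===== VERDICT (by name: the statement is the Claim_ definition above) =====
theorem get_loop_body_nodes_spec : Claim_equal_get_loop_body_nodes := by
  intro hash_map loop_nodes _ _
  unfold Spec_get_loop_body_nodes get_loop_body_nodes get_loop_body_nodes_alt
  rw [pvOuter_eq]
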